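-- pv_equiv track=rewrite | github.com/xenosks/codebasics | duplicate_encoder.py | duplicate_encode
-- ===== SOURCE A (Python) =====
-- def duplicate_encode(string):
--     string = string.lower()  # Convert the string to lowercase to ignore capitalization
--     new_string = ""
--
--     for char in string:
--         if string.count(char) > 1:
--             new_string += ")"
--         else:
--             new_string += "("
--
--     return new_string
-- ===== SOURCE B (Python) =====
-- def duplicate_encode(string):
--     s = string.lower()
--     t = sorted(s)
--     dups = {a for a, b in zip(t, t[1:]) if a == b}
--     return "".join(")" if c in dups else "(" for c in s)
-- ===== Notes on version B (the rewrite author's own statement) =====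
-- stated objective: faster
-- what changed: Detects duplicated characters by sorting the lowercased string and collecting characters with an equal adjacent neighbour in the sorted order (sort-then-adjacency-scan), instead of rescanning the string with .count for every character; the output pass then marks membership in that adjacency-derived set.
import Mathlib
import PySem

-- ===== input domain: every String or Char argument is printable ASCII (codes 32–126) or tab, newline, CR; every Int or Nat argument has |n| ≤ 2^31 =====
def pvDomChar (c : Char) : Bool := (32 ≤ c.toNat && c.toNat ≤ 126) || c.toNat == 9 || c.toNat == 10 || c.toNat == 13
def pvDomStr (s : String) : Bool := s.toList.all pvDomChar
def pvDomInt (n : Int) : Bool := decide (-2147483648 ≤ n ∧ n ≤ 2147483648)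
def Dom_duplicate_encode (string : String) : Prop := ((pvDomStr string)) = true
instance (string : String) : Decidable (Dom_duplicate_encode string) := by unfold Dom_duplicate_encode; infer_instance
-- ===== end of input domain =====

-- B replaces A's quadratic per-character string.count rescan by sorting the lowercased
-- string and collecting the characters that have an equal adjacent neighbour in sorted order.

-- ===== PORT A =====
-- string = string.lower(); for char in string: new_string += ")" if string.count(char) > 1 else "("
def duplicate_encode (string : String) : String :=
  let s : List Char := (PySem.Str.lower string).toList
  String.mk (s.foldl (fun acc c => acc ++ [if PySem.Chars.count s [c] > 1 then ')' else '(']) [])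

-- ===== PORT B =====
-- s = string.lower(); t = sorted(s); dups = {a for a,b in zip(t, t[1:]) if a == b};
-- "".join(")" if c in dups else "(" for c in s)
def duplicate_encode_alt (string : String) : String :=
  let s : List Char := (PySem.Str.lower string).toList
  let t : List Char := PySem.List.sorted s (fun c => c) false
  let dups : PySem.Set Char :=
    PySem.Set.ofList (((t.zip (PySem.List.slice t (some 1) none)).filter
      (fun p => p.1 == p.2)).map Prod.fst)
  String.mk (s.map (fun c => if PySem.Set.contains dups c then ')' else '('))

-- ===== PRECONDITION & SPEC =====
def Spec_duplicate_encode (string : String) (out : String) : Prop := out = duplicate_encode_alt string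
instance (string : String) (out : String) : Decidable (Spec_duplicate_encode string out) := by unfold Spec_duplicate_encode; infer_instance

-- ===== CLAIM (what is proved, stated in full; the proofs are below) =====
def Claim_equal_duplicate_encode : Prop := ∀ (string : String), Dom_duplicate_encode string → Spec_duplicate_encode string (duplicate_encode string)

-- ===== LEMMAS AND PROOFS =====

-- substring count of a single character equals the character count
theorem countgo_single (c : Char) : ∀ (l : List Char) (fuel acc : Nat), l.length ≤ fuel →
    PySem.Chars.count.go [c] fuel l acc = acc + l.count c := by
  intro l
  induction l with
  | nil => intro fuel acc _; cases fuel <;> simp [PySem.Chars.count.go]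
  | cons h t ih =>
    intro fuel acc hf
    cases fuel with
    | zero => simp at hf
    | succ f =>
      simp only [PySem.Chars.count.go, List.isPrefixOf, List.length_cons] at *
      by_cases hc : c = h
      · subst hc
        simp [ih f (acc + 1) (by omega)]
        omega
      · have hbe : (c == h) = false := by simp [hc]
        simp [hbe, ih f acc (by omega), Ne.symm hc]

theorem count_single (l : List Char) (c : Char) :
    PySem.Chars.count l [c] = l.count c := by
  simp [PySem.Chars.count, countgo_single c l l.length 0 (le_refl _)]

-- t[1:] is the tail
theorem slice_one_eq_tail {α : Type} (l : List α) : PySem.List.slice l (some 1) none = l.tail := by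
  cases l with
  | nil => rfl
  | cons a u => simp [PySem.List.slice]

-- in a ≤-sorted list, a character has an equal adjacent neighbour iff it occurs at least twice
theorem mem_adjacent_dups : ∀ (t : List Char), t.Pairwise (· ≤ ·) → ∀ (c : Char),
    (c ∈ ((t.zip t.tail).filter (fun p => p.1 == p.2)).map Prod.fst ↔ 2 ≤ t.count c) := by
  intro t
  induction t with
  | nil => intro _ c; simp
  | cons x tail ih =>
    intro hp c
    cases tail with
    | nil =>
      simp only [List.tail_cons, List.zip_nil_right, List.filter_nil,
        List.map_nil, List.not_mem_nil, false_iff, not_le]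
      by_cases hc : c = x
      · subst hc; simp
      · simp [Ne.symm hc]
    | cons y r =>
      have hxy : x ≤ y := (List.pairwise_cons.mp hp).1 y (by simp)
      have hptail : (y :: r).Pairwise (· ≤ ·) := (List.pairwise_cons.mp hp).2
      have hyr : ∀ z ∈ r, y ≤ z := (List.pairwise_cons.mp hptail).1
      have ihc := ih hptail c
      simp only [List.tail_cons] at ihc ⊢
      rw [List.zip_cons_cons, List.filter_cons]
      by_cases hxyeq : x = y
      · subst hxyeq
        rw [if_pos (by simp), List.map_cons, List.mem_cons, ihc]
        by_cases hc : c = x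
        · subst hc
          have h1 : (c :: c :: r).count c = r.count c + 2 := by simp
          rw [h1]
          constructor
          · intro _; omega
          · intro _; left; rfl
        · have h1 : (x :: x :: r).count c = (x :: r).count c := by
            simp [Ne.symm hc]
          rw [h1]
          constructor
          · rintro (h | h)
            · exact absurd h hc
            · exact h
          · intro h; right; exact h
      · rw [if_neg (by simpa using hxyeq), ihc]
        by_cases hc : c = x
        · subst hc
          -- c = x < y ≤ everything in r, so c occurs exactly once
          have hlt : c < y := lt_of_le_of_ne hxy hxyeq
          have hnoty : y ≠ c := fun h => absurd h.symm (ne_of_lt hlt)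
          have hnotr : c ∉ r := fun hr =>
            absurd (le_antisymm (le_of_lt hlt) (hyr c hr)) (Ne.symm hnoty)
          have h1 : (c :: y :: r).count c = 1 := by
            simp [hnoty, List.count_eq_zero.mpr hnotr]
          have h2 : (y :: r).count c = 0 := by
            simp [hnoty, List.count_eq_zero.mpr hnotr]
          rw [h1, h2]
          omega
        · have h1 : (x :: y :: r).count c = (y :: r).count c := by
            simp [List.count_cons, Ne.symm hc]
          rw [h1]

-- ===== VERDICT (by name: the statement is the Claim_ definition above) =====
theorem duplicate_encode_spec : Claim_equal_duplicate_encode := by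
  intro string _
  unfold Spec_duplicate_encode duplicate_encode duplicate_encode_alt
  simp only
  rw [PySem.List.foldl_append_singleton_eq_map, List.nil_append]
  refine congrArg String.mk ?_
  apply List.map_congr_left
  intro c hc
  set s : List Char := (PySem.Str.lower string).toList with hs
  set t : List Char := PySem.List.sorted s (fun c => c) false with ht
  have hslice : PySem.List.slice t (some 1) none = t.tail := slice_one_eq_tail t
  have hsortedp : t.Pairwise (· ≤ ·) := by
    simpa using PySem.List.sorted_pairwise s (fun c => c)
  have hperm : t.Perm s := PySem.List.sorted_perm s (fun c => c) false
  have hadj := mem_adjacent_dups t hsortedp c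
  have hcount : t.count c = s.count c := hperm.count_eq c
  rw [count_single, hslice]
  have hmem : PySem.Set.contains
      (PySem.Set.ofList (((t.zip t.tail).filter (fun p => p.1 == p.2)).map Prod.fst)) c
      = decide (2 ≤ s.count c) := by
    by_cases h2 : 2 ≤ s.count c
    · have hm : c ∈ ((t.zip t.tail).filter (fun p => p.1 == p.2)).map Prod.fst := by
        rw [hadj, hcount]; exact h2
      rw [(PySem.Set.contains_iff _ c).mpr ((PySem.Set.mem_ofList _ c).mpr hm)]
      simp [h2]
    · have hm : c ∉ ((t.zip t.tail).filter (fun p => p.1 == p.2)).map Prod.fst := by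
        rw [hadj, hcount]; omega
      have hfalse : PySem.Set.contains
          (PySem.Set.ofList (((t.zip t.tail).filter (fun p => p.1 == p.2)).map Prod.fst)) c
          = false := by
        rw [← Bool.not_eq_true]
        intro hcontra
        exact hm ((PySem.Set.mem_ofList _ c).mp ((PySem.Set.contains_iff _ c).mp hcontra))
      rw [hfalse]
      simp [h2]
  rw [hmem]
  by_cases h2 : 2 ≤ s.count c <;> simp [h2] <;> omega
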